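-- pv_equiv track=rewrite | github.com/andrerocco/programacao-orientada-a-objetos | Exercicios/Exercícios de Revisão (Aula 7).py | primo_proximo
-- ===== SOURCE A (Python) =====
-- def primo_proximo(num):
--     contador = num
--
--     while True:
--         multiplos = 0
--         for i in range(2, contador):
--             if contador % i == 0:
--                 multiplos += 1
--         if multiplos == 0:
--             primo = contador
--             break
--         contador -= 1
--
--     return primo
-- ===== SOURCE B (Python) =====
-- def _eh_primo(n):
--     d = 2
--     while d * d <= n:
--         if n % d == 0:
--             return False
--         d += 1
--     return True
--
--
-- def primo_proximo(num):
--     contador = num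
--     while contador > 2:
--         if _eh_primo(contador):
--             return contador
--         contador -= 1
--     return contador
-- ===== Notes on version B (the rewrite author's own statement) =====
-- stated objective: faster
-- what changed: A counts every divisor of each candidate over the full range 2..c-1; B tests candidates by trial division only up to sqrt(c) with an early return on the first divisor found.
import Mathlib
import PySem

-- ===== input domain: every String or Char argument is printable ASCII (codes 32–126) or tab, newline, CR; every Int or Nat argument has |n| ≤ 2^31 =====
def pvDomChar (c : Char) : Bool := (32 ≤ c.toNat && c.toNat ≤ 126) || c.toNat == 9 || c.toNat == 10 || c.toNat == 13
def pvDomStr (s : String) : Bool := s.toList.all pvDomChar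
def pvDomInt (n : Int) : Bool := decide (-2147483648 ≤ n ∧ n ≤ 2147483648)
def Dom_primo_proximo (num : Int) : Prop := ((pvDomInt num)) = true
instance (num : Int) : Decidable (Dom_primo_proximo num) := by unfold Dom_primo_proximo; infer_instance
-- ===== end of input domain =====

-- B replaces A's full-range divisor count per candidate by trial division up to sqrt with an early break.


-- ===== PORT A =====
-- the inner for-loop of A: multiplos after scanning range(2, contador)
def pvCountMult (contador : Int) : Int :=
  (PySem.List.pyRange 2 contador 1).foldl
    (fun multiplos i => if PySem.Int.mod contador i == 0 then multiplos + 1 else multiplos) 0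

-- needed for termination of the while-loop below
theorem pvCountMult_of_le_two {c : Int} (h : c ≤ 2) : pvCountMult c = 0 := by
  have : PySem.List.pyRange 2 c 1 = [] := by
    rw [PySem.List.pyRange_one]
    have : (c - 2).toNat = 0 := by omega
    simp [this]
  simp [pvCountMult, this]

def pvLoopA (contador : Int) : Int :=
  if pvCountMult contador = 0 then contador
  else pvLoopA (contador - 1)
termination_by (contador - 2).toNat
decreasing_by
  have h2 : 2 < contador := by
    by_contra h
    exact (by assumption : ¬ pvCountMult contador = 0) (pvCountMult_of_le_two (by omega))
  omega

def primo_proximo (num : Int) : Int := pvLoopA num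

-- ===== PORT B =====
theorem pv_le_mul_self (d : Int) : d ≤ d * d := by nlinarith [sq_nonneg (d - 1)]

def pvTrial (n d : Int) : Bool :=
  if d * d ≤ n then
    if PySem.Int.mod n d = 0 then false
    else pvTrial n (d + 1)
  else true
termination_by (n + 1 - d).toNat
decreasing_by
  have := pv_le_mul_self d
  omega

def primo_proximo_alt (num : Int) : Int := pvLoopB num
where
  pvLoopB (contador : Int) : Int :=
    if 2 < contador then
      if pvTrial contador 2 then contador
      else pvLoopB (contador - 1)
    else contador
  termination_by (contador - 2).toNat
  decreasing_by omega

-- ===== PRECONDITION & SPEC =====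
def Spec_primo_proximo (num : Int) (out : Int) : Prop := out = primo_proximo_alt num
instance (num : Int) (out : Int) : Decidable (Spec_primo_proximo num out) := by unfold Spec_primo_proximo; infer_instance

-- ===== CLAIM (what is proved, stated in full; the proofs are below) =====
def Claim_equal_primo_proximo : Prop := ∀ (num : Int), Dom_primo_proximo num → Spec_primo_proximo num (primo_proximo num)

-- ===== LEMMAS AND PROOFS =====

-- A's divisor count is zero iff no divisor in [2, c)
theorem pvCountMult_eq_zero_iff (c : Int) :
    pvCountMult c = 0 ↔ ∀ i : Int, 2 ≤ i → i < c → ¬ i ∣ c := by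
  unfold pvCountMult
  rw [PySem.List.foldl_count_if]
  simp only [zero_add, Int.natCast_eq_zero, List.countP_eq_zero]
  constructor
  · intro h i h2 hlt hdvd
    have hm := h i (PySem.List.mem_pyRange_one.mpr ⟨h2, hlt⟩)
    simp [PySem.Int.mod_eq_zero_iff_dvd] at hm
    exact hm hdvd
  · intro h i hi
    obtain ⟨h2, hlt⟩ := PySem.List.mem_pyRange_one.mp hi
    simp [PySem.Int.mod_eq_zero_iff_dvd]
    exact h i h2 hlt

-- B's trial-division loop: true iff no divisor m ≥ d with m*m ≤ n
theorem pvTrial_eq_true_iff (n : Int) :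
    ∀ d : Int, 2 ≤ d → (pvTrial n d = true ↔ ∀ m : Int, d ≤ m → m * m ≤ n → ¬ m ∣ n) := by
  intro d
  induction d using pvTrial.induct n with
  | case1 d hle hmod =>
    intro _
    rw [pvTrial, if_pos hle, if_pos hmod]
    constructor
    · exact fun habs => (Bool.false_ne_true habs).elim
    · exact fun h => (h d le_rfl hle ((PySem.Int.mod_eq_zero_iff_dvd n d).mp hmod)).elim
  | case2 d hle hmod ih =>
    intro h2
    rw [pvTrial, if_pos hle, if_neg hmod, ih (by omega)]
    constructor
    · intro h m hdm hmm hdvd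
      rcases eq_or_lt_of_le hdm with heq | hlt
      · exact hmod ((PySem.Int.mod_eq_zero_iff_dvd n d).mpr (heq ▸ hdvd))
      · exact h m (by omega) hmm hdvd
    · intro h m hdm hmm hdvd
      exact h m (by omega) hmm hdvd
  | case3 d hgt =>
    intro h2
    rw [pvTrial, if_neg hgt]
    simp only [true_iff]
    intro m hdm hmm hdvd
    have : d * d ≤ m * m := by nlinarith
    omega

-- the sqrt-bounded test equals the full-range test, for c ≥ 3 (via Nat primality)
theorem pv_bridge {c : Int} (hc : 3 ≤ c) :
    (∀ i : Int, 2 ≤ i → i < c → ¬ i ∣ c) ↔ (∀ m : Int, 2 ≤ m → m * m ≤ c → ¬ m ∣ c) := by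
  set n : Nat := c.toNat with hn
  have hcn : c = (n : Int) := by omega
  have h2n : 2 ≤ n := by omega
  constructor
  · intro h m h2m hmm hdvd
    have hp : n.Prime := by
      rw [Nat.prime_def_lt']
      refine ⟨h2n, fun j hj hjn hjd => ?_⟩
      exact h j (by omega) (by omega) (by rw [hcn]; exact_mod_cast hjd)
    have hm' : (m.toNat : Int) = m := Int.toNat_of_nonneg (by omega)
    have hdn : m.toNat ∣ n := by
      have : (m.toNat : Int) ∣ (n : Int) := by rw [hm', ← hcn]; exact hdvd
      exact_mod_cast this
    have hsq : m.toNat ≤ n.sqrt := by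
      rw [Nat.le_sqrt']
      have : (m.toNat : Int) ^ 2 ≤ (n : Int) := by rw [hm', ← hcn, pow_two]; exact hmm
      exact_mod_cast this
    exact (Nat.prime_def_le_sqrt.mp hp).2 m.toNat (by omega) hsq hdn
  · intro h i h2i hic hdvd
    have hp : n.Prime := by
      rw [Nat.prime_def_le_sqrt]
      refine ⟨h2n, fun j hj hjs hjd => ?_⟩
      have hjj : (j : Int) * (j : Int) ≤ c := by
        rw [hcn]
        have := Nat.le_sqrt'.mp hjs
        rw [pow_two] at this
        exact_mod_cast this
      exact h j (by exact_mod_cast hj) hjj (by rw [hcn]; exact_mod_cast hjd)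
    have hi' : (i.toNat : Int) = i := Int.toNat_of_nonneg (by omega)
    have hdn : i.toNat ∣ n := by
      have : (i.toNat : Int) ∣ (n : Int) := by rw [hi', ← hcn]; exact hdvd
      exact_mod_cast this
    exact (Nat.prime_def_lt'.mp hp).2 i.toNat (by omega) (by omega) hdn

theorem pvLoop_eq : ∀ (k : Nat) (c : Int), (c - 2).toNat = k → pvLoopA c = primo_proximo_alt.pvLoopB c := by
  intro k
  induction k with
  | zero =>
    intro c hk
    have hc : c ≤ 2 := by omega
    rw [pvLoopA, primo_proximo_alt.pvLoopB]
    simp [pvCountMult_of_le_two hc, not_lt.mpr hc]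
  | succ k ih =>
    intro c hk
    have hc : 3 ≤ c := by omega
    have hiff : pvCountMult c = 0 ↔ pvTrial c 2 = true := by
      rw [pvCountMult_eq_zero_iff, pvTrial_eq_true_iff c 2 le_rfl]
      exact pv_bridge hc
    rw [pvLoopA, primo_proximo_alt.pvLoopB, if_pos (by omega : (2:Int) < c)]
    by_cases h : pvCountMult c = 0
    · rw [if_pos h, if_pos (hiff.mp h)]
    · rw [if_neg h, if_neg (fun ht => h (hiff.mpr ht))]
      exact ih (c - 1) (by omega)

-- ===== VERDICT (by name: the statement is the Claim_ definition above) =====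
theorem primo_proximo_spec : Claim_equal_primo_proximo := by
  intro num _
  unfold Spec_primo_proximo primo_proximo primo_proximo_alt
  exact pvLoop_eq _ num rfl
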